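-- pv_equiv track=rewrite | github.com/gregbarnette-cyber/SpaceAndScienceFictionApp | core/shared.py | _parse_designations_from_ids
-- ===== SOURCE A (Python) =====
-- _CSV_PREFIX_MAP = [
--     ("NAME ",       "NAME"),
--     ("GJ ",         "GJ"),
--     ("HD ",         "HD"),
--     ("HIP ",        "HIP"),
--     ("HR ",         "HR"),
--     ("Wolf ",       "Wolf"),
--     ("LHS ",        "LHS"),
--     ("BD+",         "BD"),
--     ("BD-",         "BD"),
--     ("BD ",         "BD"),
--     ("K2 ",         "K2"),
--     ("Kepler-",     "Kepler"),
--     ("Kepler ",     "Kepler"),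
--     ("KOI-",        "KOI"),
--     ("KOI ",        "KOI"),
--     ("TOI-",        "TOI"),
--     ("TOI ",        "TOI"),
--     ("CoRoT-",      "CoRoT"),
--     ("CoRoT ",      "CoRoT"),
--     ("COCONUTS-",   "COCONUTS"),
--     ("HAT-P-",      "HAT_P"),
--     ("WASP-",       "WASP"),
--     ("TIC ",        "TIC"),
--     ("Gaia EDR3 ",  "Gaia EDR3"),
--     ("2MASS J",     "2MASS"),
--     ("2MASS ",      "2MASS"),
-- ]
--
-- _CSV_DESIG_KEYS = [
--     "NAME", "GJ", "HD", "HIP", "HR", "Wolf", "LHS", "BD",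
--     "K2", "Kepler", "KOI", "TOI", "CoRoT", "COCONUTS", "HAT_P", "WASP",
--     "TIC", "Gaia EDR3", "2MASS",
-- ]
--
-- def _parse_designations_from_ids(ids_string):
--     """Parse a pipe-separated SIMBAD ids string into a comma-separated designation string.
--
--     Returns a string of found designations (excluding MAIN_ID), or an empty string.
--     """
--     desig = {k: None for k in _CSV_DESIG_KEYS}
--     if not ids_string:
--         return ""
--     for id_str in ids_string.split("|"):
--         id_str = id_str.strip()
--         for prefix, key in _CSV_PREFIX_MAP:
--             if id_str.startswith(prefix) and desig[key] is None:
--                 desig[key] = id_str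
--                 break
--     parts = [desig[k] for k in _CSV_DESIG_KEYS if desig[k] is not None]
--     return ", ".join(parts)
-- ===== SOURCE B (Python) =====
-- _CSV_KEY_PREFIXES = [
--     ("NAME", ("NAME ",)),
--     ("GJ", ("GJ ",)),
--     ("HD", ("HD ",)),
--     ("HIP", ("HIP ",)),
--     ("HR", ("HR ",)),
--     ("Wolf", ("Wolf ",)),
--     ("LHS", ("LHS ",)),
--     ("BD", ("BD+", "BD-", "BD ")),
--     ("K2", ("K2 ",)),
--     ("Kepler", ("Kepler-", "Kepler ")),
--     ("KOI", ("KOI-", "KOI ")),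
--     ("TOI", ("TOI-", "TOI ")),
--     ("CoRoT", ("CoRoT-", "CoRoT ")),
--     ("COCONUTS", ("COCONUTS-",)),
--     ("HAT_P", ("HAT-P-",)),
--     ("WASP", ("WASP-",)),
--     ("TIC", ("TIC ",)),
--     ("Gaia EDR3", ("Gaia EDR3 ",)),
--     ("2MASS", ("2MASS J", "2MASS ")),
-- ]
--
--
-- def _parse_designations_from_ids(ids_string):
--     """Parse a pipe-separated SIMBAD ids string into a comma-separated designation string."""
--     if not ids_string:
--         return ""
--     tokens = [t.strip() for t in ids_string.split("|")]
--     parts = []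
--     for _key, prefixes in _CSV_KEY_PREFIXES:
--         hit = next((t for t in tokens if t.startswith(prefixes)), None)
--         if hit is not None:
--             parts.append(hit)
--     return ", ".join(parts)
-- ===== Notes on version B (the rewrite author's own statement) =====
-- stated objective: alternative
-- what changed: B inverts the loop nesting: instead of A's token-outer scan filling an all-None dict via first-matching-prefix with break, B strips the tokens once and, for each designation key in output order, takes the first token matching any of that key's prefixes (prefixes pre-grouped by key), appending hits directly; no dict is built.
import Mathlib
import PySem

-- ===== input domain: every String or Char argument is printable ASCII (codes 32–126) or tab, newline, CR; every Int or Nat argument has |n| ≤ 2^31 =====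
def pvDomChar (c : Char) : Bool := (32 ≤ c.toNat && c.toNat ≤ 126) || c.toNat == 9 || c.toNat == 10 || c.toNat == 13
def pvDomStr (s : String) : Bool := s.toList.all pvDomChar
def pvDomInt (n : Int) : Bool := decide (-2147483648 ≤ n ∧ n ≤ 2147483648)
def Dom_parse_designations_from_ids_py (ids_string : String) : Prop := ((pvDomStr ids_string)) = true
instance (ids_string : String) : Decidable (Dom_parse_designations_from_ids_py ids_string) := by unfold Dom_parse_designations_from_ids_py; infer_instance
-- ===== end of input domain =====

-- B inverts A's loop nesting: per designation key, first token matching that key's prefixes (alternative decomposition, no dict).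

-- ===== PORT A =====
def pvPrefixMap : List (String × String) := [
  ("NAME ", "NAME"), ("GJ ", "GJ"), ("HD ", "HD"), ("HIP ", "HIP"), ("HR ", "HR"),
  ("Wolf ", "Wolf"), ("LHS ", "LHS"), ("BD+", "BD"), ("BD-", "BD"), ("BD ", "BD"),
  ("K2 ", "K2"), ("Kepler-", "Kepler"), ("Kepler ", "Kepler"), ("KOI-", "KOI"), ("KOI ", "KOI"),
  ("TOI-", "TOI"), ("TOI ", "TOI"), ("CoRoT-", "CoRoT"), ("CoRoT ", "CoRoT"), ("COCONUTS-", "COCONUTS"),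
  ("HAT-P-", "HAT_P"), ("WASP-", "WASP"), ("TIC ", "TIC"), ("Gaia EDR3 ", "Gaia EDR3"),
  ("2MASS J", "2MASS"), ("2MASS ", "2MASS")]

def pvDesigKeys : List String := [
  "NAME", "GJ", "HD", "HIP", "HR", "Wolf", "LHS", "BD",
  "K2", "Kepler", "KOI", "TOI", "CoRoT", "COCONUTS", "HAT_P", "WASP",
  "TIC", "Gaia EDR3", "2MASS"]

-- A's inner 'for prefix, key in _CSV_PREFIX_MAP: … break' loop
def pvInnerA (pm : List (String × String)) (d : PySem.Dict String (Option String))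
    (t : String) : PySem.Dict String (Option String) :=
  match pm with
  | [] => d
  | (p, k) :: rest =>
      if PySem.Str.startswith t p && (d.getD k none == none) then d.insert k (some t)
      else pvInnerA rest d t

def parse_designations_from_ids_py (ids_string : String) : String :=
  let desig : PySem.Dict String (Option String) :=
    pvDesigKeys.foldl (fun d k => d.insert k none) PySem.Dict.empty
  if ids_string = "" then ""
  else
    let desig :=
      ((PySem.Str.split? ids_string "|").getD []).foldl
        (fun d t => pvInnerA pvPrefixMap d (PySem.Str.strip t)) desig
    let parts := pvDesigKeys.filterMap (fun k => desig.getD k none)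
    PySem.Str.join ", " parts

-- ===== PORT B =====
def pvKeyPrefixes : List (String × List String) := [
  ("NAME", ["NAME "]), ("GJ", ["GJ "]), ("HD", ["HD "]), ("HIP", ["HIP "]), ("HR", ["HR "]),
  ("Wolf", ["Wolf "]), ("LHS", ["LHS "]), ("BD", ["BD+", "BD-", "BD "]),
  ("K2", ["K2 "]), ("Kepler", ["Kepler-", "Kepler "]), ("KOI", ["KOI-", "KOI "]),
  ("TOI", ["TOI-", "TOI "]), ("CoRoT", ["CoRoT-", "CoRoT "]), ("COCONUTS", ["COCONUTS-"]),
  ("HAT_P", ["HAT-P-"]), ("WASP", ["WASP-"]), ("TIC", ["TIC "]),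
  ("Gaia EDR3", ["Gaia EDR3 "]), ("2MASS", ["2MASS J", "2MASS "])]

def parse_designations_from_ids_py_alt (ids_string : String) : String :=
  if ids_string = "" then ""
  else
    let tokens := ((PySem.Str.split? ids_string "|").getD []).map PySem.Str.strip
    let parts := pvKeyPrefixes.filterMap
      (fun g => tokens.find? (fun t => g.2.any (fun p => PySem.Str.startswith t p)))
    PySem.Str.join ", " parts

-- ===== PRECONDITION & SPEC =====
def Spec_parse_designations_from_ids_py (ids_string : String) (out : String) : Prop := out = parse_designations_from_ids_py_alt ids_string
instance (ids_string : String) (out : String) : Decidable (Spec_parse_designations_from_ids_py ids_string out) := by unfold Spec_parse_designations_from_ids_py; infer_instance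

-- ===== CLAIM (what is proved, stated in full; the proofs are below) =====
def Claim_equal_parse_designations_from_ids_py : Prop := ∀ (ids_string : String), Dom_parse_designations_from_ids_py ids_string → Spec_parse_designations_from_ids_py ids_string (parse_designations_from_ids_py ids_string)

-- ===== LEMMAS AND PROOFS =====

-- the key the first matching prefix of pvPrefixMap assigns to a token, if any
def pvMatchKey? (t : String) : Option String :=
  (pvPrefixMap.find? (fun e => PySem.Str.startswith t e.1)).map Prod.snd

-- finite check: prefixes of DIFFERENT keys are never prefixes of one another
theorem pv_cross_bool :
    (pvPrefixMap.all (fun e1 => pvPrefixMap.all (fun e2 =>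
      !(e1.1.toList.isPrefixOf e2.1.toList || e2.1.toList.isPrefixOf e1.1.toList)
        || (e1.2 == e2.2)))) = true := rfl

-- finite check: pvKeyPrefixes is exactly pvPrefixMap grouped by key
theorem pv_group_bool :
    (pvKeyPrefixes.all (fun g => g.2.all (fun p => pvPrefixMap.contains (p, g.1)))
      && pvPrefixMap.all (fun e => pvKeyPrefixes.all (fun g =>
           !(e.2 == g.1) || g.2.contains e.1))) = true := rfl

-- a token matching two prefixes of the map matches prefixes of the same key
theorem pv_cross (t : String) (e1 e2 : String × String)
    (h1 : e1 ∈ pvPrefixMap) (h2 : e2 ∈ pvPrefixMap)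
    (hs1 : PySem.Str.startswith t e1.1 = true)
    (hs2 : PySem.Str.startswith t e2.1 = true) : e1.2 = e2.2 := by
  have hp1 : e1.1.toList <+: t.toList := by
    rw [PySem.Str.startswith_eq] at hs1; exact (PySem.Chars.startswith_iff _ _).mp hs1
  have hp2 : e2.1.toList <+: t.toList := by
    rw [PySem.Str.startswith_eq] at hs2; exact (PySem.Chars.startswith_iff _ _).mp hs2
  have hor := List.prefix_or_prefix_of_prefix hp1 hp2
  have hall := List.all_eq_true.mp (List.all_eq_true.mp pv_cross_bool e1 h1) e2 h2
  simp only [Bool.or_eq_true, Bool.not_eq_true', Bool.or_eq_false_iff, beq_iff_eq] at hall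
  rcases hall with ⟨hno1, hno2⟩ | heq
  · rcases hor with h | h
    · exact absurd (List.isPrefixOf_iff_prefix.mpr h) (by simp [hno1])
    · exact absurd (List.isPrefixOf_iff_prefix.mpr h) (by simp [hno2])
  · exact heq

theorem pv_innerA_none (pm : List (String × String)) (d : PySem.Dict String (Option String))
    (t : String) (h : pm.find? (fun e => PySem.Str.startswith t e.1) = none) :
    pvInnerA pm d t = d := by
  induction pm with
  | nil => rfl
  | cons e rest ih =>
    obtain ⟨p, k⟩ := e
    rw [List.find?_cons] at h
    cases hsw : PySem.Chars.startswith t.toList p.toList with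
    | false =>
      simp only [PySem.Str.startswith_eq, hsw] at h
      simp only [pvInnerA, PySem.Str.startswith_eq, hsw, Bool.false_and, Bool.false_eq_true,
        if_false]
      exact ih h
    | true =>
      simp only [PySem.Str.startswith_eq, hsw] at h
      exact absurd h (by simp)

theorem pv_innerA_filled (pm : List (String × String)) (d : PySem.Dict String (Option String))
    (t k : String)
    (hk : ∀ e ∈ pm, PySem.Str.startswith t e.1 = true → e.2 = k)
    (hd : d.getD k none ≠ none) :
    pvInnerA pm d t = d := by
  induction pm with
  | nil => rfl
  | cons e rest ih =>
    obtain ⟨p, k'⟩ := e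
    have hrest : ∀ e ∈ rest, PySem.Str.startswith t e.1 = true → e.2 = k :=
      fun e he => hk e (List.mem_cons_of_mem _ he)
    cases hsw : PySem.Chars.startswith t.toList p.toList with
    | false =>
      simp only [pvInnerA, PySem.Str.startswith_eq, hsw, Bool.false_and, Bool.false_eq_true,
        if_false]
      exact ih hrest
    | true =>
      have hk' : k' = k := hk (p, k') List.mem_cons_self (by simpa using hsw)
      have hb : (d.getD k' none == none) = false := by
        rw [hk']
        cases hg : d.getD k none with
        | none => exact absurd hg hd
        | some v => rfl
      simp only [pvInnerA, PySem.Str.startswith_eq, hsw, hb, Bool.and_false, Bool.false_eq_true,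
        if_false]
      exact ih hrest

theorem pv_innerA_some (pm : List (String × String)) (d : PySem.Dict String (Option String))
    (t : String) (e : String × String)
    (hf : pm.find? (fun e => PySem.Str.startswith t e.1) = some e)
    (hk : ∀ e' ∈ pm, PySem.Str.startswith t e'.1 = true → e'.2 = e.2) :
    pvInnerA pm d t = if d.getD e.2 none = none then d.insert e.2 (some t) else d := by
  induction pm with
  | nil => simp at hf
  | cons e0 rest ih =>
    obtain ⟨p, k'⟩ := e0
    rw [List.find?_cons] at hf
    have hrest : ∀ e' ∈ rest, PySem.Str.startswith t e'.1 = true → e'.2 = e.2 :=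
      fun e' he' => hk e' (List.mem_cons_of_mem _ he')
    cases hsw : PySem.Chars.startswith t.toList p.toList with
    | false =>
      simp only [PySem.Str.startswith_eq, hsw] at hf
      simp only [pvInnerA, PySem.Str.startswith_eq, hsw, Bool.false_and, Bool.false_eq_true,
        if_false]
      exact ih hf hrest
    | true =>
      simp only [PySem.Str.startswith_eq, hsw] at hf
      have he : (p, k') = e := by simpa using hf
      have hk2 : k' = e.2 := by rw [← he]
      by_cases hd : d.getD e.2 none = none
      · have hb : (d.getD e.2 none == none) = true := by rw [hd]; rfl
        rw [if_pos hd]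
        simp [pvInnerA, hsw, hk2, hb]
      · have hb : (d.getD k' none == none) = false := by
          rw [hk2]
          cases hg : d.getD e.2 none with
          | none => exact absurd hg hd
          | some v => rfl
        rw [if_neg hd]
        simp only [pvInnerA, PySem.Str.startswith_eq, hsw, hb, Bool.and_false, Bool.false_eq_true,
          if_false]
        exact pv_innerA_filled rest d t e.2 hrest hd

-- lookup after one token step
theorem pv_innerA_getD (d : PySem.Dict String (Option String)) (t k : String) :
    (pvInnerA pvPrefixMap d t).getD k none =
      if pvMatchKey? t = some k ∧ d.getD k none = none then some t else d.getD k none := by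
  cases hf : pvPrefixMap.find? (fun e => PySem.Str.startswith t e.1) with
  | none =>
    rw [pv_innerA_none pvPrefixMap d t hf]
    have hmk : pvMatchKey? t = none := by rw [pvMatchKey?, hf]; rfl
    rw [hmk]
    simp
  | some e =>
    have hmem := List.mem_of_find?_eq_some hf
    have hpred : PySem.Str.startswith t e.1 = true := by simpa using List.find?_some hf
    have hk : ∀ e' ∈ pvPrefixMap, PySem.Str.startswith t e'.1 = true → e'.2 = e.2 :=
      fun e' he' hs' => pv_cross t e' e he' hmem hs' hpred
    rw [pv_innerA_some pvPrefixMap d t e hf hk]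
    have hmk : pvMatchKey? t = some e.2 := by rw [pvMatchKey?, hf]; rfl
    rw [hmk]
    by_cases hd : d.getD e.2 none = none
    · rw [if_pos hd, PySem.Dict.getD_insert]
      by_cases hke : k = e.2
      · rw [if_pos hke, if_pos ⟨by rw [hke], by rw [hke]; exact hd⟩]
      · rw [if_neg hke, if_neg (fun hc => hke (Option.some.inj hc.1).symm)]
    · rw [if_neg hd]
      by_cases hke : k = e.2
      · rw [if_neg (fun hc => hd (hke ▸ hc.2))]
      · rw [if_neg (fun hc => hke (Option.some.inj hc.1).symm)]

-- lookup after the whole token loop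
theorem pv_fold_getD (ts : List String) (d : PySem.Dict String (Option String)) (k : String) :
    ((ts.foldl (fun d t => pvInnerA pvPrefixMap d t) d).getD k none) =
      (match d.getD k none with
       | some v => some v
       | none => ts.find? (fun t => pvMatchKey? t == some k)) := by
  induction ts generalizing d with
  | nil =>
    simp only [List.foldl_nil, List.find?_nil]
    cases d.getD k none <;> rfl
  | cons t ts' ih =>
    simp only [List.foldl_cons, List.find?_cons]
    rw [ih, pv_innerA_getD]
    cases hdk : d.getD k none with
    | some v => simp
    | none =>
      by_cases hm : pvMatchKey? t = some k
      · simp [hm]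
      · have hb : (pvMatchKey? t == some k) = false := by simpa using hm
        simp [hm, hb]

theorem pv_init_getD_aux (ks : List String) (d : PySem.Dict String (Option String)) (k : String)
    (h : d.getD k none = none) :
    ((ks.foldl (fun d k => d.insert k none) d).getD k none) = none := by
  induction ks generalizing d with
  | nil => exact h
  | cons k' ks' ih =>
    simp only [List.foldl_cons]
    apply ih
    rw [PySem.Dict.getD_insert]
    split <;> simp [h]

-- A's per-key predicate coincides with B's grouped-prefix predicate
theorem pv_pred_eq (g : String × List String) (hg : g ∈ pvKeyPrefixes) (t : String) :
    (pvMatchKey? t == some g.1) = g.2.any (fun p => PySem.Str.startswith t p) := by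
  have hgroup := Bool.and_eq_true_iff.mp pv_group_bool
  rw [Bool.eq_iff_iff]
  simp only [beq_iff_eq, List.any_eq_true]
  constructor
  · intro hmk
    rcases Option.map_eq_some_iff.mp hmk with ⟨e, hf, he2⟩
    have hmem := List.mem_of_find?_eq_some hf
    have hpred : PySem.Str.startswith t e.1 = true := by simpa using List.find?_some hf
    have hall := List.all_eq_true.mp (List.all_eq_true.mp hgroup.2 e hmem) g hg
    simp only [Bool.or_eq_true, Bool.not_eq_true', beq_eq_false_iff_ne, ne_eq] at hall
    rcases hall with hne | hc
    · exact absurd he2 hne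
    · exact ⟨e.1, List.contains_iff_mem.mp hc, hpred⟩
  · intro hex
    rcases hex with ⟨p, hp, hsw⟩
    have hall := List.all_eq_true.mp (List.all_eq_true.mp hgroup.1 g hg) p hp
    have hpm : (p, g.1) ∈ pvPrefixMap := List.contains_iff_mem.mp hall
    have hsome : (pvPrefixMap.find? (fun e => PySem.Str.startswith t e.1)).isSome := by
      rw [List.find?_isSome]
      exact ⟨(p, g.1), hpm, hsw⟩
    rcases Option.isSome_iff_exists.mp hsome with ⟨e, hf⟩
    have he2 : e.2 = g.1 :=
      pv_cross t e (p, g.1) (List.mem_of_find?_eq_some hf) hpm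
        (by simpa using List.find?_some hf) hsw
    unfold pvMatchKey?
    rw [hf, Option.map_some, he2]

-- ===== VERDICT (by name: the statement is the Claim_ definition above) =====
theorem parse_designations_from_ids_py_spec : Claim_equal_parse_designations_from_ids_py := by
  intro s _
  unfold Spec_parse_designations_from_ids_py
  by_cases hs : s = ""
  · simp only [parse_designations_from_ids_py, parse_designations_from_ids_py_alt, if_pos hs]
  · simp only [parse_designations_from_ids_py, parse_designations_from_ids_py_alt, if_neg hs]
    congr 1
    have hkeys : pvDesigKeys = pvKeyPrefixes.map Prod.fst := rfl
    rw [hkeys, List.filterMap_map]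
    apply List.filterMap_congr
    intro g hg
    have hfold :
        (((PySem.Str.split? s "|").getD []).foldl
            (fun d t => pvInnerA pvPrefixMap d (PySem.Str.strip t))
            ((pvKeyPrefixes.map Prod.fst).foldl (fun d k => d.insert k none) PySem.Dict.empty)).getD
            g.1 none
          = (((PySem.Str.split? s "|").getD []).map PySem.Str.strip).find?
              (fun t => pvMatchKey? t == some g.1) := by
      rw [← List.foldl_map (f := PySem.Str.strip) (g := fun d t => pvInnerA pvPrefixMap d t)]
      rw [pv_fold_getD]
      rw [pv_init_getD_aux (pvKeyPrefixes.map Prod.fst) PySem.Dict.empty g.1 (by simp)]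
    simp only [Function.comp_apply]
    rw [hfold]
    congr 1
    funext t
    exact pv_pred_eq g hg t
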